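-- pv_equiv track=rewrite | github.com/jasoncookdesign/beatport-continuity | src/bpc/compute.py | _compute_segments
-- ===== SOURCE A (Python) =====
-- from typing import Dict, List, Sequence, Tuple
--
-- def _compute_segments(idxs: List[int]) -> Tuple[int, int, int]:
--     """Return (segments_count, max_streak_weeks, last_streak_weeks)."""
--     if not idxs:
--         return 0, 0, 0
--
--     segments = 1
--     current = 1
--     max_streak = 1
--     last_streak = 1
--
--     for prev, curr in zip(idxs, idxs[1:]):
--         if curr == prev + 1:
--             current += 1
--         else:
--             segments += 1
--             current = 1
--         max_streak = max(max_streak, current)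
--         last_streak = current
--
--     return segments, max_streak, last_streak
-- ===== SOURCE B (Python) =====
-- def _compute_segments(idxs):
--     """Return (segments_count, max_streak_weeks, last_streak_weeks)."""
--     n = len(idxs)
--     if n == 0:
--         return 0, 0, 0
--     # segment boundaries: positions where a new run starts, plus both ends
--     bounds = [0] + [i for i in range(1, n) if idxs[i] != idxs[i - 1] + 1] + [n]
--     # run lengths are the differences of consecutive boundaries
--     runs = [b - a for a, b in zip(bounds, bounds[1:])]
--     return len(runs), max(runs), runs[-1]
-- ===== Notes on version B (the rewrite author's own statement) =====
-- stated objective: alternative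
-- what changed: B computes the list of segment-boundary indices (positions i with idxs[i] != idxs[i-1]+1, plus 0 and n), takes run lengths as differences of consecutive boundaries, and aggregates with len, max and last element, instead of A's single accumulator loop over adjacent pairs tracking segments/current/max/last.
import Mathlib
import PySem

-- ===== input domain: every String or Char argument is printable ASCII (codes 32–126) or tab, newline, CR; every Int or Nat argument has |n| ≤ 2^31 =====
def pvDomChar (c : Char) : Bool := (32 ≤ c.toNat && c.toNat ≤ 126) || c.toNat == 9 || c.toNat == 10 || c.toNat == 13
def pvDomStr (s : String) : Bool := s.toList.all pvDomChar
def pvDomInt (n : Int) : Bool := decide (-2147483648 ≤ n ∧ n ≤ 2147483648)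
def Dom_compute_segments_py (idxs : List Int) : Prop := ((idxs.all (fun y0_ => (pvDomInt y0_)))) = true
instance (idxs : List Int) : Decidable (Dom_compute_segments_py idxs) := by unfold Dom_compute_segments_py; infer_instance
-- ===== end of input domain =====

-- B replaces A's accumulator loop by computing segment-boundary indices and taking differences
-- of consecutive boundaries as run lengths, aggregated with len, max and last element (objective: alternative).

-- ===== PORT A =====
-- the for-loop over zip(idxs, idxs[1:]) with state (segments, current, max_streak, last_streak)
def pvLoopA : List (Int × Int) → Int × Int × Int × Int → Int × Int × Int
  | [], (segments, _current, max_streak, last_streak) => (segments, max_streak, last_streak)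
  | (prev, curr) :: rest, (segments, current, max_streak, _last) =>
    if curr = prev + 1 then
      pvLoopA rest (segments, current + 1, max max_streak (current + 1), current + 1)
    else
      pvLoopA rest (segments + 1, 1, max max_streak 1, 1)

def compute_segments_py (idxs : List Int) : Int × Int × Int :=
  match idxs with
  | [] => (0, 0, 0)
  | _ :: _ => pvLoopA (idxs.zip (PySem.List.slice idxs (some 1) none)) (1, 1, 1, 1)

-- ===== PORT B =====
def compute_segments_py_alt (idxs : List Int) : Int × Int × Int :=
  let n : Int := idxs.length
  if n = 0 then (0, 0, 0)
  else
    -- bounds = [0] + [i for i in range(1, n) if idxs[i] != idxs[i-1] + 1] + [n]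
    -- idxs[i] / idxs[i-1] are always in range for i in range(1, n), so pyGetD's default is unreachable
    let bounds : List Int := 0 :: ((PySem.List.pyRange 1 n 1).filter
        (fun i => PySem.List.pyGetD idxs i 0 != PySem.List.pyGetD idxs (i - 1) 0 + 1)) ++ [n]
    -- runs = [b - a for a, b in zip(bounds, bounds[1:])]
    let runs := (bounds.zip bounds.tail).map (fun ab => ab.2 - ab.1)
    -- runs is nonempty here, so max(runs) and the last-element lookup never raise; the .getD 0 defaults are unreachable
    ((runs.length : Int), (PySem.List.max? runs (fun y => y)).getD 0,
      (PySem.List.pyGet? runs (-1)).getD 0)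

-- ===== PRECONDITION & SPEC =====
def Spec_compute_segments_py (idxs : List Int) (out : Int × Int × Int) : Prop := out = compute_segments_py_alt idxs
instance (idxs : List Int) (out : Int × Int × Int) : Decidable (Spec_compute_segments_py idxs out) := by unfold Spec_compute_segments_py; infer_instance

-- ===== CLAIM =====
def Claim_equal_compute_segments_py : Prop := ∀ (idxs : List Int), Dom_compute_segments_py idxs → Spec_compute_segments_py idxs (compute_segments_py idxs)

-- ===== LEMMAS AND PROOFS =====

-- reference run-length list: first run of (v :: ys) already counted with length n
def pvGoRuns : List Int → Int → Int → List Int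
  | [], _, n => [n]
  | y :: ys, v, n => if y = v + 1 then pvGoRuns ys y (n + 1) else n :: pvGoRuns ys y 1

-- reference boundary indices: next position to examine is i, previous value is v
def pvBreaks : List Int → Int → Int → List Int
  | [], _, _ => []
  | y :: ys, v, i => if y = v + 1 then pvBreaks ys y (i + 1) else i :: pvBreaks ys y (i + 1)

def pvDiffs (l : List Int) : List Int := (l.zip l.tail).map (fun ab => ab.2 - ab.1)

def pvIntMax : List Int → Int
  | [] => 0
  | [x] => x
  | x :: y :: ys => max x (pvIntMax (y :: ys))

def pvIntLast : List Int → Int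
  | [] => 0
  | [x] => x
  | _ :: y :: ys => pvIntLast (y :: ys)

theorem pvGoRuns_ne_nil : ∀ (ys : List Int) (v n : Int), pvGoRuns ys v n ≠ [] := by
  intro ys
  induction ys with
  | nil => intro v n; simp [pvGoRuns]
  | cons y ys ih =>
      intro v n
      simp only [pvGoRuns]
      split
      · exact ih y (n + 1)
      · simp

theorem le_pvIntMax_pvGoRuns : ∀ (ys : List Int) (v n : Int), n ≤ pvIntMax (pvGoRuns ys v n) := by
  intro ys
  induction ys with
  | nil => intro v n; simp [pvGoRuns, pvIntMax]
  | cons y ys ih =>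
      intro v n
      simp only [pvGoRuns]
      split
      · have := ih y (n + 1); omega
      · obtain ⟨c, cs, hc⟩ := List.exists_cons_of_ne_nil (pvGoRuns_ne_nil ys y 1)
        rw [hc]
        simp [pvIntMax]

theorem pvLoopA_eq : ∀ (ys : List Int) (v segs cur mx : Int), 1 ≤ cur → cur ≤ mx →
    pvLoopA ((v :: ys).zip ys) (segs, cur, mx, cur)
      = (segs - 1 + ((pvGoRuns ys v cur).length : Int),
         max mx (pvIntMax (pvGoRuns ys v cur)), pvIntLast (pvGoRuns ys v cur)) := by
  intro ys
  induction ys with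
  | nil =>
      intro v segs cur mx h1 h2
      simp [pvLoopA, pvGoRuns, pvIntMax, pvIntLast]
      omega
  | cons y ys ih =>
      intro v segs cur mx h1 h2
      simp only [List.zip_cons_cons, pvLoopA, pvGoRuns]
      split
      · rw [ih y segs (cur + 1) (max mx (cur + 1)) (by omega) (by omega)]
        have := le_pvIntMax_pvGoRuns ys y (cur + 1)
        refine Prod.ext ?_ (Prod.ext ?_ rfl) <;> simp <;> omega
      · rw [ih y (segs + 1) 1 (max mx 1) (by omega) (by omega)]
        obtain ⟨c, cs, hc⟩ := List.exists_cons_of_ne_nil (pvGoRuns_ne_nil ys y 1)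
        rw [hc]
        have := le_pvIntMax_pvGoRuns ys y 1
        rw [hc] at this
        refine Prod.ext ?_ (Prod.ext ?_ ?_)
        · simp
        · simp [pvIntMax]
          omega
        · simp [pvIntLast]

-- B's filtered index range equals the reference boundary list
theorem pvFilter_eq_pvBreaks : ∀ (t : List Int) (full : List Int) (x : Int) (j : Nat),
    full.drop j = x :: t →
    (PySem.List.pyRange ((j : Int) + 1) (full.length : Int) 1).filter
      (fun i => PySem.List.pyGetD full i 0 != PySem.List.pyGetD full (i - 1) 0 + 1)
      = pvBreaks t x ((j : Int) + 1) := by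
  intro t
  induction t with
  | nil =>
      intro full x j h
      have hh : full.length - j = 1 := by simpa using congrArg List.length h
      rw [PySem.List.pyRange_one_eq_nil (by omega)]
      simp [pvBreaks]
  | cons y ys ih =>
      intro full x j h
      have hh : full.length - j = ys.length + 2 := by simpa using congrArg List.length h
      have hdrop' : full.drop (j + 1) = y :: ys := by
        rw [← List.tail_drop, h, List.tail_cons]
      have hjx : full[(j : Nat)]? = some x := by
        have t0 : (full.drop j)[0]? = full[j + 0]? := List.getElem?_drop
        rw [h] at t0
        simpa using t0.symm
      have hjy : full[(j + 1 : Nat)]? = some y := by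
        have t0 : (full.drop (j + 1))[0]? = full[(j + 1) + 0]? := List.getElem?_drop
        rw [hdrop'] at t0
        simpa using t0.symm
      have hg1 : PySem.List.pyGetD full ((j : Int) + 1) 0 = y := by
        have e : ((j : Int) + 1) = ((j + 1 : Nat) : Int) := by push_cast; ring
        rw [e, PySem.List.pyGetD_natCast, List.getD_eq_getElem?_getD, hjy]
        rfl
      have hg0 : PySem.List.pyGetD full ((j : Int) + 1 - 1) 0 = x := by
        have e : ((j : Int) + 1 - 1) = ((j : Nat) : Int) := by omega
        rw [e, PySem.List.pyGetD_natCast, List.getD_eq_getElem?_getD, hjx]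
        rfl
      rw [PySem.List.pyRange_one_cons (by omega), List.filter_cons, hg1, hg0]
      have hrest := ih full y (j + 1) hdrop'
      have hcast : ((j : Int) + 1 + 1) = (((j + 1 : Nat) : Int) + 1) := by push_cast; ring
      simp only [pvBreaks]
      by_cases hy : y = x + 1
      · rw [if_neg (by simp [hy]), if_pos hy, hcast, hrest]
      · rw [if_pos (by simpa using hy), if_neg hy, hcast, hrest]

theorem pvDiffs_cons_cons (a b : Int) (l : List Int) :
    pvDiffs (a :: b :: l) = (b - a) :: pvDiffs (b :: l) := rfl

-- differences of consecutive boundaries are exactly the run lengths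
theorem pvDiffs_eq_goRuns : ∀ (t : List Int) (v s cnt : Int),
    pvDiffs (s :: (pvBreaks t v (s + cnt) ++ [s + cnt + (t.length : Int)])) = pvGoRuns t v cnt := by
  intro t
  induction t with
  | nil =>
      intro v s cnt
      simp [pvBreaks, pvGoRuns, pvDiffs]
  | cons y ys ih =>
      intro v s cnt
      simp only [pvBreaks, pvGoRuns, List.length_cons]
      push_cast
      by_cases hy : y = v + 1
      · rw [if_pos hy, if_pos hy]
        have h1 : s + cnt + 1 = s + (cnt + 1) := by ring
        have h2 : s + cnt + ((ys.length : Int) + 1) = s + (cnt + 1) + (ys.length : Int) := by ring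
        rw [h1, h2]
        exact ih y s (cnt + 1)
      · rw [if_neg hy, if_neg hy]
        have h2 : s + cnt + ((ys.length : Int) + 1) = (s + cnt) + 1 + (ys.length : Int) := by ring
        rw [List.cons_append, pvDiffs_cons_cons, h2, ih y (s + cnt) 1]
        congr 1
        omega

theorem pvFoldl_max_init : ∀ (ds : List Int) (a b : Int),
    ds.foldl max (max a b) = max a (ds.foldl max b) := by
  intro ds
  induction ds with
  | nil => intro a b; simp [List.foldl]
  | cons e es ih =>
      intro a b
      simp only [List.foldl]
      rw [max_assoc, ih]

theorem pvIntMax_eq_foldl : ∀ (cs : List Int) (c : Int), pvIntMax (c :: cs) = cs.foldl max c := by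
  intro cs
  induction cs with
  | nil => intro c; simp [pvIntMax]
  | cons d ds ih =>
      intro c
      show max c (pvIntMax (d :: ds)) = ds.foldl max (max c d)
      rw [ih d, pvFoldl_max_init]

theorem pvGetLast?_eq : ∀ (cs : List Int) (c : Int), (c :: cs).getLast? = some (pvIntLast (c :: cs)) := by
  intro cs
  induction cs with
  | nil => intro c; rfl
  | cons d ds ih =>
      intro c
      rw [List.getLast?_cons_cons, ih d]
      rfl

-- ===== VERDICT =====
theorem compute_segments_py_spec : Claim_equal_compute_segments_py := by
  intro idxs _
  unfold Spec_compute_segments_py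
  cases idxs with
  | nil => rfl
  | cons x xs =>
      have hfilter := pvFilter_eq_pvBreaks xs (x :: xs) x 0 (by simp)
      simp only [Nat.cast_zero, zero_add, List.length_cons] at hfilter
      simp only [compute_segments_py, compute_segments_py_alt, PySem.List.slice_from_one,
        List.tail_cons, List.length_cons]
      rw [pvLoopA_eq xs x 1 1 1 (by omega) (by omega)]
      rw [if_neg (by push_cast; omega)]
      rw [hfilter]
      have hlen1 : ((xs.length + 1 : Nat) : Int) = 1 + (xs.length : Int) := by push_cast; ring
      rw [hlen1]
      have hruns := pvDiffs_eq_goRuns xs x 0 1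
      rw [show (0 : Int) + 1 = 1 by norm_num] at hruns
      simp only [pvDiffs] at hruns
      simp only [List.cons_append]
      rw [hruns]
      obtain ⟨c, cs, hc⟩ := List.exists_cons_of_ne_nil (pvGoRuns_ne_nil xs x 1)
      have hmax := le_pvIntMax_pvGoRuns xs x 1
      rw [hc] at hmax ⊢
      rw [PySem.List.max?_id_cons, PySem.List.pyGet?_neg_one, pvGetLast?_eq,
        ← pvIntMax_eq_foldl]
      refine Prod.ext ?_ (Prod.ext ?_ rfl) <;> simp <;> omega
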